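-- pv_equiv track=rewrite | github.com/SedaMirzoyan/Maze_shortest_path_between_points | maze_GStyle_comments.py | is_endpoint
-- ===== SOURCE A (Python) =====
-- def is_endpoint(maze_and_coords, moves):
--     """
--     Check if path has reached to end point
--
--     Args:
--         maze_and_coords (tuple): board (2D list) and list of coordinates of Start and End points
--         moves (list): list of the moves
--
--     Return:
--         bool: if we reached to the endpoint True, else False
--     """
--     maze, coords = maze_and_coords
--     start_x = coords[0][0]
--     start_y = coords[0][1]
--
--     end = (coords[1][0],coords[1][1])
--     #we are iterating through all the directions and changing start location based on current direction
--     for move in moves: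
--         if move == "L":
--             start_y = start_y - 1
--         elif move == "R":
--             start_y = start_y + 1
--         elif move == "U":
--             start_x = start_x - 1
--         elif move == "D":
--             start_x = start_x + 1
--
--     #checks if we have reached to the end point
--     if ((start_x, start_y)) == end:
--         return True
--
--     return False
-- ===== SOURCE B (Python) =====
-- def is_endpoint(maze_and_coords, moves):
--     maze, coords = maze_and_coords
--     dx = moves.count("D") - moves.count("U")
--     dy = moves.count("R") - moves.count("L")
--     return (coords[0][0] + dx, coords[0][1] + dy) == (coords[1][0], coords[1][1])
-- ===== Notes on version B (the rewrite author's own statement) =====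
-- stated objective: simpler
-- what changed: Replaces the per-move branching loop over a mutating position with a closed-form net displacement computed from four move counts and a single tuple comparison.
import Mathlib
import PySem

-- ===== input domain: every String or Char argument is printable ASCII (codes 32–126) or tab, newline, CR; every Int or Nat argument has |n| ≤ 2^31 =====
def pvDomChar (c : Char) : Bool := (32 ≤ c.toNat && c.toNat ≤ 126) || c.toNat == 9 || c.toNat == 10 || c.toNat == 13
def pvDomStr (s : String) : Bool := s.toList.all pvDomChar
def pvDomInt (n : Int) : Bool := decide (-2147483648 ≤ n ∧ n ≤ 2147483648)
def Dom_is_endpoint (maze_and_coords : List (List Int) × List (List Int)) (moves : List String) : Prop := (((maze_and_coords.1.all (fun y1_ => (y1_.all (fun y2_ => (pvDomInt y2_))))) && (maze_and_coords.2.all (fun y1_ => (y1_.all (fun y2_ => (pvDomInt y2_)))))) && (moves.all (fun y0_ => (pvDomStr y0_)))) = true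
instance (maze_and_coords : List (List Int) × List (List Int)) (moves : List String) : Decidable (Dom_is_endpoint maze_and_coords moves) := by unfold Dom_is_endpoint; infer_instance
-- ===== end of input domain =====

-- ===== PORT A =====
-- B computes the end position in closed form from move counts instead of A's per-move branching loop (objective: simpler).
-- Port of A: unpack start/end coordinates, then fold the branching update over the moves.
def is_endpoint (maze_and_coords : List (List Int) × List (List Int)) (moves : List String) : Bool :=
  let coords := maze_and_coords.2
  let row0 := (PySem.List.pyGet? coords 0).getD []
  let row1 := (PySem.List.pyGet? coords 1).getD []
  let start_x := (PySem.List.pyGet? row0 0).getD 0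
  let start_y := (PySem.List.pyGet? row0 1).getD 0
  let endp : Int × Int := ((PySem.List.pyGet? row1 0).getD 0, (PySem.List.pyGet? row1 1).getD 0)
  let p := moves.foldl (fun (s : Int × Int) move =>
      if move == "L" then (s.1, s.2 - 1)
      else if move == "R" then (s.1, s.2 + 1)
      else if move == "U" then (s.1 - 1, s.2)
      else if move == "D" then (s.1 + 1, s.2)
      else s) (start_x, start_y)
  decide (p = endp)

-- ===== PORT B =====
-- Port of B: net displacement from the four counts, one comparison.
def is_endpoint_alt (maze_and_coords : List (List Int) × List (List Int)) (moves : List String) : Bool :=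
  let coords := maze_and_coords.2
  let row0 := (PySem.List.pyGet? coords 0).getD []
  let row1 := (PySem.List.pyGet? coords 1).getD []
  let dx : Int := (PySem.List.count moves "D" : Int) - (PySem.List.count moves "U" : Int)
  let dy : Int := (PySem.List.count moves "R" : Int) - (PySem.List.count moves "L" : Int)
  decide (((PySem.List.pyGet? row0 0).getD 0 + dx, (PySem.List.pyGet? row0 1).getD 0 + dy)
    = (((PySem.List.pyGet? row1 0).getD 0 : Int), ((PySem.List.pyGet? row1 1).getD 0 : Int)))

-- ===== PRECONDITION & SPEC =====
-- Pre_ excludes exactly the inputs where A raises IndexError: fewer than two coordinate rows,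
-- or a row with fewer than two entries.
def Pre_is_endpoint (maze_and_coords : List (List Int) × List (List Int)) (moves : List String) : Prop :=
  2 ≤ maze_and_coords.2.length ∧ 2 ≤ (maze_and_coords.2.getD 0 []).length ∧ 2 ≤ (maze_and_coords.2.getD 1 []).length
instance (maze_and_coords : List (List Int) × List (List Int)) (moves : List String) : Decidable (Pre_is_endpoint maze_and_coords moves) := by unfold Pre_is_endpoint; infer_instance
def pvWitness_is_endpoint : (List (List Int) × List (List Int)) × List String :=
  (([[0]], [[0, 0], [1, 1]]), ["D", "R", "x"])
def Spec_is_endpoint (maze_and_coords : List (List Int) × List (List Int)) (moves : List String) (out : Bool) : Prop := out = is_endpoint_alt maze_and_coords moves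
instance (maze_and_coords : List (List Int) × List (List Int)) (moves : List String) (out : Bool) : Decidable (Spec_is_endpoint maze_and_coords moves out) := by unfold Spec_is_endpoint; infer_instance

-- ===== CLAIM (what is proved, stated in full; the proofs are below) =====
def Claim_equal_is_endpoint : Prop := ∀ (maze_and_coords : List (List Int) × List (List Int)) (moves : List String), Dom_is_endpoint maze_and_coords moves → Pre_is_endpoint maze_and_coords moves → Spec_is_endpoint maze_and_coords moves (is_endpoint maze_and_coords moves)

-- ===== LEMMAS AND PROOFS =====

-- ===== VERDICT (by name: the statement is the Claim_ definition above) =====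
-- A's fold ends at start + (net displacement given by the four counts).
theorem foldl_moves_eq (moves : List String) (sx sy : Int) :
    moves.foldl (fun (s : Int × Int) move =>
      if move == "L" then (s.1, s.2 - 1)
      else if move == "R" then (s.1, s.2 + 1)
      else if move == "U" then (s.1 - 1, s.2)
      else if move == "D" then (s.1 + 1, s.2)
      else s) (sx, sy)
    = (sx + ((PySem.List.count moves "D" : Int) - (PySem.List.count moves "U" : Int)),
       sy + ((PySem.List.count moves "R" : Int) - (PySem.List.count moves "L" : Int))) := by
  induction moves generalizing sx sy with
  | nil => simp [PySem.List.count]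
  | cons m ms ih =>
    simp only [List.foldl_cons, PySem.List.count_eq, List.count_cons] at *
    by_cases hL : m == "L" <;> by_cases hR : m == "R" <;> by_cases hU : m == "U" <;>
      by_cases hD : m == "D" <;> simp_all <;> push_cast <;> ring

theorem is_endpoint_spec : Claim_equal_is_endpoint := by
  intro mc moves _ hpre
  unfold Spec_is_endpoint is_endpoint is_endpoint_alt
  simp only [foldl_moves_eq]
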